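-- pv_equiv track=rewrite | github.com/evangelos-dimitriadis/flask-project | models/properties.py | serialize_monetdb_get
-- ===== SOURCE A (Python) =====
-- def serialize_monetdb_get(appstruct):
--     properties = appstruct.split("\n")
--     list_of_dict = []
--     dict = {}
--     name = None
--     for i in range(1, len(properties) - 1):
--         line_properties = properties[i].split()
--
--         if name and name != line_properties[0]:
--             list_of_dict.append(dict)
--             dict = {}
--
--         name = line_properties[0]
--         dict[line_properties[1]] = line_properties[-1]
--
--     list_of_dict.append(dict)
--
--     return list_of_dict
-- ===== SOURCE B (Python) =====
-- def serialize_monetdb_get(appstruct):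
--     # span-based grouping: consume one run of equal first tokens per outer step
--     toks = [line.split() for line in appstruct.split("\n")[1:-1]]
--     result = []
--     rest = toks
--     while rest:
--         head, tail = rest[0], rest[1:]
--         key = head[0]
--         j = 0
--         while j < len(tail) and tail[j][0] == key:
--             j += 1
--         d = {}
--         for t in [head] + tail[:j]:
--             d[t[1]] = t[-1]
--         result.append(d)
--         rest = tail[j:]
--     return result or [{}]
-- ===== Notes on version B (the rewrite author's own statement) =====
-- stated objective: alternative
-- what changed: Replaces A's single index loop with carried name/current-dict/flush state by a span-based grouper: tokenize the middle lines once, then repeatedly split off the leading run of lines sharing a first token and build that run's dict in one inner pass (empty input naturally yielding the [{}] A returns).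
import Mathlib
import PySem

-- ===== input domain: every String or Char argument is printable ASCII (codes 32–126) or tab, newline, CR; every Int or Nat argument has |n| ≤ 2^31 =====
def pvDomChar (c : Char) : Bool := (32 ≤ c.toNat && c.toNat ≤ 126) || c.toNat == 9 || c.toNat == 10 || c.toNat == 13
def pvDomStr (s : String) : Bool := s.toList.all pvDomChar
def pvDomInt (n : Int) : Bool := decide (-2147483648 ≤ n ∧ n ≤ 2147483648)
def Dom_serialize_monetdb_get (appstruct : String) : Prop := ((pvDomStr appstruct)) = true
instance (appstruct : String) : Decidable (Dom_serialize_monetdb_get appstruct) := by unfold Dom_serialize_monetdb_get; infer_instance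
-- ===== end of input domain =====

-- B re-groups the middle lines by spans of equal first tokens (span/rest recursion) instead of
-- A's single loop with carried name/dict state; objective: alternative decomposition, not speed.

-- ===== PORT A =====
-- loop body of A for one line (state = (list_of_dict, dict, name))
def pvLineStep (st : List (PySem.Dict String String) × PySem.Dict String String × Option String)
    (line : String) :
    List (PySem.Dict String String) × PySem.Dict String String × Option String :=
  let lp := PySem.Str.split₀ line
  let h0 := PySem.List.pyGetD lp 0 ""
  let fl : Bool := match st.2.2 with | none => false | some s => s != "" && s != h0
  let lod := if fl then st.1 ++ [st.2.1] else st.1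
  let d := if fl then PySem.Dict.empty else st.2.1
  (lod, d.insert (PySem.List.pyGetD lp 1 "") (PySem.List.pyGetD lp (-1) ""), some h0)

def serialize_monetdb_get (appstruct : String) : List (List (String × String)) :=
  let properties := (PySem.Str.split? appstruct "\n").getD []
  let fin := (PySem.List.pyRange 1 ((properties.length : Int) - 1) 1).foldl
      (fun st i => pvLineStep st (PySem.List.pyGetD properties i ""))
      ([], PySem.Dict.empty, none)
  (fin.1 ++ [fin.2.1]).map (·.items)

-- ===== PORT B =====
-- one dict per span of lines sharing the first token; the inner while is the takeWhile/dropWhile pair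
def pvGroup : List (List String) → List (PySem.Dict String String)
  | [] => []
  | t :: rest =>
    let key := PySem.List.pyGetD t 0 ""
    let grp := t :: rest.takeWhile (fun u => PySem.List.pyGetD u 0 "" == key)
    let d := grp.foldl
      (fun d u => d.insert (PySem.List.pyGetD u 1 "") (PySem.List.pyGetD u (-1) ""))
      PySem.Dict.empty
    d :: pvGroup (rest.dropWhile (fun u => PySem.List.pyGetD u 0 "" == key))
  termination_by ts => ts.length
  decreasing_by
    simp only [List.length_cons]
    have := List.length_dropWhile_le (fun u => PySem.List.pyGetD u 0 "" == PySem.List.pyGetD t 0 "") rest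
    omega

def serialize_monetdb_get_alt (appstruct : String) : List (List (String × String)) :=
  let toks := (PySem.List.slice ((PySem.Str.split? appstruct "\n").getD []) (some 1) (some (-1))).map
      PySem.Str.split₀
  let result := (pvGroup toks).map (·.items)
  if result.isEmpty then [[]] else result

-- ===== PRECONDITION & SPEC =====
-- Pre_ excludes exactly the inputs where Python A raises IndexError: a middle line with fewer than two
-- whitespace-separated tokens.
def Pre_serialize_monetdb_get (appstruct : String) : Prop :=
  ∀ line ∈ ((PySem.Str.split? appstruct "\n").getD []).tail.dropLast,
    2 ≤ (PySem.Str.split₀ line).length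
instance (appstruct : String) : Decidable (Pre_serialize_monetdb_get appstruct) := by
  unfold Pre_serialize_monetdb_get; infer_instance
def pvWitness_serialize_monetdb_get : String := "hdr\na b\na c\nd e\ntrailer"

def Spec_serialize_monetdb_get (appstruct : String) (out : List (List (String × String))) : Prop :=
  out = serialize_monetdb_get_alt appstruct
instance (appstruct : String) (out : List (List (String × String))) :
    Decidable (Spec_serialize_monetdb_get appstruct out) := by
  unfold Spec_serialize_monetdb_get; infer_instance

-- ===== CLAIM (what is proved, stated in full; the proofs are below) =====
def Claim_equal_serialize_monetdb_get : Prop :=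
  ∀ (appstruct : String), Dom_serialize_monetdb_get appstruct →
    Pre_serialize_monetdb_get appstruct →
    Spec_serialize_monetdb_get appstruct (serialize_monetdb_get appstruct)

-- ===== LEMMAS AND PROOFS =====

theorem pv_go_tok_ne_nil (s cur : List Char) (acc : List (List Char))
    (hacc : ∀ w ∈ acc, w ≠ []) :
    ∀ w ∈ PySem.Chars.split₀.go s cur acc, w ≠ [] := by
  induction s generalizing cur acc with
  | nil =>
    intro w hw
    simp only [PySem.Chars.split₀.go] at hw
    split at hw
    · exact hacc w (by simpa using hw)
    · rename_i hcur
      simp only [List.mem_reverse, List.mem_cons] at hw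
      rcases hw with h | h
      · subst h; simp_all [List.isEmpty_iff]
      · exact hacc w h
  | cons c rest ih =>
    intro w hw
    simp only [PySem.Chars.split₀.go] at hw
    split at hw
    · split at hw
      · exact ih [] acc hacc w hw
      · refine ih [] (cur.reverse :: acc) ?_ w hw
        intro u hu
        rcases List.mem_cons.mp hu with h | h
        · subst h; rename_i hcur; simp_all [List.isEmpty_iff]
        · exact hacc u h
    · exact ih (c :: cur) acc hacc w hw

theorem pv_split₀_tok_ne_nil (s : String) : ∀ w ∈ PySem.Str.split₀ s, w ≠ "" := by
  intro w hw
  simp only [PySem.Str.split₀, List.mem_map] at hw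
  obtain ⟨tok, htok, rfl⟩ := hw
  have h := pv_go_tok_ne_nil s.toList [] [] (by simp) tok htok
  intro hcontra
  apply h
  have h2 : (String.ofList tok).toList = tok := by simp
  rw [hcontra] at h2
  simpa using h2.symm


def pvIns (d : PySem.Dict String String) (u : List String) : PySem.Dict String String :=
  d.insert (PySem.List.pyGetD u 1 "") (PySem.List.pyGetD u (-1) "")

def pvStepT (st : List (PySem.Dict String String) × PySem.Dict String String × Option String)
    (lp : List String) :
    List (PySem.Dict String String) × PySem.Dict String String × Option String :=
  let h0 := PySem.List.pyGetD lp 0 ""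
  let fl : Bool := match st.2.2 with | none => false | some s => s != "" && s != h0
  ((if fl then st.1 ++ [st.2.1] else st.1), pvIns (if fl then PySem.Dict.empty else st.2.1) lp,
    some h0)

theorem pvGroup_cons (t : List String) (rest : List (List String)) :
    pvGroup (t :: rest) =
      ((t :: rest.takeWhile (fun u => PySem.List.pyGetD u 0 "" == PySem.List.pyGetD t 0 "")).foldl
          pvIns PySem.Dict.empty) ::
        pvGroup (rest.dropWhile (fun u => PySem.List.pyGetD u 0 "" == PySem.List.pyGetD t 0 "")) := by
  simp only [pvGroup]; rfl

theorem pvRun (ts : List (List String)) (nm : String) (d : PySem.Dict String String)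
    (acc : List (PySem.Dict String String)) (hnm : nm ≠ "")
    (hts : ∀ t ∈ ts, PySem.List.pyGetD t 0 "" ≠ "") :
    (ts.foldl pvStepT (acc, d, some nm)).1 ++ [(ts.foldl pvStepT (acc, d, some nm)).2.1] =
      acc ++ ((ts.takeWhile (fun u => PySem.List.pyGetD u 0 "" == nm)).foldl pvIns d) ::
        pvGroup (ts.dropWhile (fun u => PySem.List.pyGetD u 0 "" == nm)) := by
  induction ts generalizing nm d acc with
  | nil => simp [pvGroup]
  | cons t rest ih =>
    have hh0 : PySem.List.pyGetD t 0 "" ≠ "" := hts t (List.mem_cons_self)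
    have hfl : (pvStepT (acc, d, some nm) t) =
        ((if (nm != PySem.List.pyGetD t 0 "") then acc ++ [d] else acc),
          pvIns (if (nm != PySem.List.pyGetD t 0 "") then PySem.Dict.empty else d) t,
          some (PySem.List.pyGetD t 0 "")) := by
      simp only [pvStepT]
      have : (nm != "") = true := by simpa [bne_iff_ne] using hnm
      simp [this]
    by_cases hk : PySem.List.pyGetD t 0 "" = nm
    · have hpred : (PySem.List.pyGetD t 0 "" == nm) = true := by simpa using hk
      rw [List.foldl_cons, hfl]
      simp only [hk, bne_self_eq_false, Bool.false_eq_true, if_false]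
      rw [ih nm (pvIns d t) acc hnm (fun u hu => hts u (List.mem_cons_of_mem _ hu))]
      simp only [List.takeWhile_cons, List.dropWhile_cons, hpred, if_true, List.foldl_cons]
    · have hpred : (PySem.List.pyGetD t 0 "" == nm) = false := by simpa using hk
      have hbne : (nm != PySem.List.pyGetD t 0 "") = true := by
        simp [bne_iff_ne]; exact fun h => hk h.symm
      rw [List.foldl_cons, hfl]
      simp only [hbne, if_true]
      rw [ih (PySem.List.pyGetD t 0 "") (pvIns PySem.Dict.empty t) (acc ++ [d]) hh0
        (fun u hu => hts u (List.mem_cons_of_mem _ hu))]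
      simp only [List.takeWhile_cons, List.dropWhile_cons, hpred, Bool.false_eq_true, if_false,
        List.foldl_nil]
      rw [pvGroup_cons, List.foldl_cons]
      simp


theorem pv_slice_mid {α : Type} (p : α) (ps : List α) :
    PySem.List.slice (p :: ps) (some 1) (some (-1)) = ps.dropLast := by
  simp [PySem.List.slice, PySem.List.clampIdx, List.dropLast_eq_take]
  rw [if_neg (by omega)]
  exact Nat.min_eq_left (by omega)

theorem pv_head_tok_ne (l : String) (h2 : 2 ≤ (PySem.Str.split₀ l).length) :
    PySem.List.pyGetD (PySem.Str.split₀ l) 0 "" ≠ "" := by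
  obtain ⟨w, tl, hwt⟩ : ∃ w tl, PySem.Str.split₀ l = w :: tl := by
    cases h : PySem.Str.split₀ l with
    | nil => rw [h] at h2; simp at h2
    | cons a b => exact ⟨a, b, rfl⟩
  rw [hwt, PySem.List.pyGetD_zero_cons]
  exact pv_split₀_tok_ne_nil l w (hwt ▸ List.mem_cons_self)

theorem serialize_monetdb_get_spec : Claim_equal_serialize_monetdb_get := by
  intro appstruct _ hpre
  unfold Spec_serialize_monetdb_get
  unfold Pre_serialize_monetdb_get at hpre
  simp only [serialize_monetdb_get, serialize_monetdb_get_alt]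
  cases hp : (PySem.Str.split? appstruct "\n").getD [] with
  | nil =>
    norm_num [PySem.List.pyRange_one_eq_nil, PySem.List.slice, pvGroup]
    rfl
  | cons p ps =>
    have hlen : (((p :: ps).length : Nat) : Int) - 1 = (((p :: ps).dropLast.length : Nat) : Int) := by
      simp [List.length_dropLast]
    rw [hlen]
    rw [PySem.List.foldl_congr_mem _ _
      (fun st i => pvLineStep st (PySem.List.pyGetD (p :: ps).dropLast i "")) _
      (by
        intro st i hi
        obtain ⟨h1, h2⟩ := (PySem.List.mem_pyRange_one).mp hi
        congr 1
        rw [PySem.List.pyGetD_eq_getElem (p :: ps) "" (by omega)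
            (by simp at h2 ⊢; omega),
          PySem.List.pyGetD_eq_getElem (p :: ps).dropLast "" (by omega) (by exact_mod_cast h2)]
        exact (List.getElem_dropLast _).symm)]
    rw [PySem.List.foldl_pyRange_pyGetD' (p :: ps).dropLast "" pvLineStep _ (by norm_num)]
    have hdrop : (p :: ps).dropLast.drop (1 : Int).toNat = ps.dropLast := by
      cases ps <;> simp
    rw [hdrop]
    have hmapf : ps.dropLast.foldl pvLineStep
        ([], PySem.Dict.empty, (none : Option String)) =
        (ps.dropLast.map PySem.Str.split₀).foldl pvStepT
          ([], PySem.Dict.empty, (none : Option String)) := by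
      rw [List.foldl_map]
      rfl
    rw [hmapf, pv_slice_mid]
    cases hm : ps.dropLast with
    | nil =>
      simp [pvGroup]
      rfl
    | cons line mids =>
      rw [hp] at hpre
      have hmem : ∀ l ∈ line :: mids, 2 ≤ (PySem.Str.split₀ l).length := by
        intro l hl
        exact hpre l (by rw [List.tail_cons, hm]; exact hl)
      have hh0 : PySem.List.pyGetD (PySem.Str.split₀ line) 0 "" ≠ "" :=
        pv_head_tok_ne line (hmem line List.mem_cons_self)
      have hts : ∀ u ∈ mids.map PySem.Str.split₀, PySem.List.pyGetD u 0 "" ≠ "" := by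
        intro u hu
        obtain ⟨l, hl, rfl⟩ := List.mem_map.mp hu
        exact pv_head_tok_ne l (hmem l (List.mem_cons_of_mem _ hl))
      have hstep1 : pvStepT ([], PySem.Dict.empty, (none : Option String))
          (PySem.Str.split₀ line) =
          ([], pvIns PySem.Dict.empty (PySem.Str.split₀ line),
            some (PySem.List.pyGetD (PySem.Str.split₀ line) 0 "")) := rfl
      rw [List.map_cons, List.foldl_cons, hstep1,
        pvRun (mids.map PySem.Str.split₀) _ _ [] hh0 hts,
        pvGroup_cons, List.foldl_cons]
      simp
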